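-- pv_equiv track=rewrite | github.com/PermutaTriangle/Permuta | permuta/permutils/pin_words.py | factor_pinword
-- ===== SOURCE A (Python) =====
-- from typing import DefaultDict, Dict, Iterator, List, Set, Tuple
--
-- DIRS = "ULDR"
--
-- def factor_pinword(word: str) -> List[str]:
--     """
--     Factors a pinword into its strong numeral led factor decomposition.
--
--     Examples:
--         >>> PinWords.factor_pinword("14L2UR")
--         ['1', '4L', '2UR']
--     """
--     position = 0
--     factor_list = []
--     while position < len(word):
--         cur = position + 1
--         while cur < len(word) and word[cur] in DIRS:
--             cur += 1
--         factor_list.append(word[position:cur])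
--         position = cur
--     return factor_list
-- ===== SOURCE B (Python) =====
-- import re
--
-- def factor_pinword(word):
--     # Each factor is one leading character followed by its greedy run of
--     # direction characters; the regex engine drives the traversal.
--     return re.findall(r'.[ULDR]*', word, re.DOTALL)
-- ===== Notes on version B (the rewrite author's own statement) =====
-- stated objective: idiomatic
-- what changed: Replaced the two-pointer nested-while index scan with a regex tokenizer re.findall(r'.[ULDR]*', word, re.DOTALL) that lets the regex engine emit each numeral-led factor directly.
import Mathlib
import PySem

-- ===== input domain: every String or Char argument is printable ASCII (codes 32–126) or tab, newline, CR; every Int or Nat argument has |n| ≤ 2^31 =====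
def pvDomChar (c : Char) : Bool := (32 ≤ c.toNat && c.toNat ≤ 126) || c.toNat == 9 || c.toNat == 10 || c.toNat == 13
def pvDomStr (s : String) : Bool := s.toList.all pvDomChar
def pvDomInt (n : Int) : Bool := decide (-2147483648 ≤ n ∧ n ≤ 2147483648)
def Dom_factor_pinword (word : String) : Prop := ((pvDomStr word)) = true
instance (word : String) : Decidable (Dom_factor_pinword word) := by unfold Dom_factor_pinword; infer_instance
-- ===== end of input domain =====

-- B replaces A's two-pointer nested-while index scan with a regex tokenizer
-- (re.findall(r'.[ULDR]*', word, re.DOTALL)); objective: idiomatic, same cost.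

-- DIRS = "ULDR"
def pvDIRS : List Char := ['U', 'L', 'D', 'R']

-- ===== PORT A =====
-- inner while: `while cur < len(word) and word[cur] in DIRS: cur += 1` (fuel = remaining length)
def pvInnerA (w : List Char) (cur : Nat) : Nat → Nat
  | 0 => cur
  | fuel + 1 =>
    if cur < w.length ∧ w.getD cur ' ' ∈ pvDIRS then pvInnerA w (cur + 1) fuel else cur

-- outer while: append word[position:cur], position = cur
def pvOuterA (w : List Char) (position : Nat) (acc : List String) : Nat → List String
  | 0 => acc
  | fuel + 1 =>
    if position < w.length then
      let cur := pvInnerA w (position + 1) (w.length - (position + 1))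
      pvOuterA w cur (acc ++ [String.mk ((w.drop position).take (cur - position))]) fuel
    else acc

def factor_pinword (word : String) : List String :=
  pvOuterA word.toList 0 [] word.toList.length

-- ===== PORT B =====
-- transcription of the regex r'.[ULDR]*' with DOTALL, greedy, applied left to right:
-- each match is any one char followed by the maximal run of direction chars.
def pvTokB (l : List Char) : List String :=
  match l with
  | [] => []
  | c :: rest =>
    let run := rest.takeWhile (fun d => d ∈ pvDIRS)
    String.mk (c :: run) :: pvTokB (rest.drop run.length)
termination_by l.length
decreasing_by
  simp only [List.length_cons]
  simp only [List.length_drop]; omega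

def factor_pinword_alt (word : String) : List String := pvTokB word.toList

-- ===== PRECONDITION & SPEC =====
def Spec_factor_pinword (word : String) (out : List String) : Prop := out = factor_pinword_alt word
instance (word : String) (out : List String) : Decidable (Spec_factor_pinword word out) := by unfold Spec_factor_pinword; infer_instance

-- ===== CLAIM (what is proved, stated in full; the proofs are below) =====
def Claim_equal_factor_pinword : Prop := ∀ (word : String), Dom_factor_pinword word → Spec_factor_pinword word (factor_pinword word)

-- ===== LEMMAS AND PROOFS =====

theorem pv_take_takeWhile {α : Type} (p : α → Bool) (l : List α) :
    l.take (l.takeWhile p).length = l.takeWhile p := by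
  induction l with
  | nil => simp
  | cons a t ih =>
    by_cases h : p a <;> simp [List.takeWhile, h, ih]

theorem pv_takeWhile_le {α : Type} (p : α → Bool) (l : List α) :
    (l.takeWhile p).length ≤ l.length := by
  induction l with
  | nil => simp
  | cons a t ih =>
    by_cases h : p a <;> simp [List.takeWhile, h] <;> omega -- both cases

theorem pvInnerA_eq (w : List Char) (cur fuel : Nat) (hf : w.length - cur ≤ fuel) :
    pvInnerA w cur fuel = cur + ((w.drop cur).takeWhile (fun d => d ∈ pvDIRS)).length := by
  induction fuel generalizing cur with
  | zero =>
    have : w.length ≤ cur := by omega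
    simp [pvInnerA, List.drop_eq_nil_of_le this]
  | succ fuel ih =>
    by_cases hc : cur < w.length
    · have hdrop : w.drop cur = w[cur] :: w.drop (cur + 1) :=
        List.drop_eq_getElem_cons hc
      have hget : w.getD cur ' ' = w[cur] := List.getD_eq_getElem w ' ' hc
      by_cases hd : w[cur] ∈ pvDIRS
      · rw [pvInnerA, if_pos ⟨hc, by rw [hget]; exact hd⟩, ih (cur + 1) (by omega), hdrop,
          List.takeWhile_cons]
        simp only [decide_eq_true hd, if_true, List.length_cons]
        omega
      · simp only [pvInnerA, hget, hdrop, List.takeWhile]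
        simp [hd, hc]
    · have : w.length ≤ cur := by omega
      simp [pvInnerA, hc, List.drop_eq_nil_of_le this]

theorem pvOuterA_eq (fuel : Nat) (w : List Char) (position : Nat) (acc : List String)
    (hf : w.length - position ≤ fuel) :
    pvOuterA w position acc fuel = acc ++ pvTokB (w.drop position) := by
  induction fuel generalizing position acc with
  | zero =>
    have : w.length ≤ position := by omega
    simp [pvOuterA, List.drop_eq_nil_of_le this, pvTokB]
  | succ fuel ih =>
    by_cases hc : position < w.length
    · have hdrop : w.drop position = w[position] :: w.drop (position + 1) :=
        List.drop_eq_getElem_cons hc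
      set rest := w.drop (position + 1) with hrest
      set run := rest.takeWhile (fun d => d ∈ pvDIRS) with hrun
      have hcur : pvInnerA w (position + 1) (w.length - (position + 1))
          = position + 1 + run.length :=
        pvInnerA_eq w (position + 1) _ (le_refl _)
      have hrestlen : rest.length = w.length - (position + 1) := by
        simp [hrest]
      have hrunlen : run.length ≤ rest.length := by
        rw [hrun]; exact pv_takeWhile_le _ _
      have hslice : (w.drop position).take (position + 1 + run.length - position)
          = w[position] :: run := by
        have : position + 1 + run.length - position = run.length + 1 := by omega
        rw [this, hdrop]
        simp only [List.take_succ_cons]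
        rw [hrun, pv_take_takeWhile]
      have hdrop2 : w.drop (position + 1 + run.length) = rest.drop run.length := by
        rw [hrest, List.drop_drop]
      simp only [pvOuterA, hc, if_true, hcur]
      rw [ih _ _ (by omega), hslice, hdrop2]
      rw [hdrop]
      conv_rhs => rw [pvTokB]
      simp [← hrun]
    · have : w.length ≤ position := by omega
      simp [pvOuterA, hc, List.drop_eq_nil_of_le this, pvTokB]

-- ===== VERDICT (by name: the statement is the Claim_ definition above) =====
theorem factor_pinword_spec : Claim_equal_factor_pinword := by
  intro word _
  unfold Spec_factor_pinword factor_pinword factor_pinword_alt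
  simpa using pvOuterA_eq word.toList.length word.toList 0 [] (by omega)
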